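-- pv_equiv track=rewrite | github.com/marciofcruz/rpa | ExtairGFD/ExtairGFD.py | get_nome_arquivo_tomadores
-- ===== SOURCE A (Python) =====
-- def get_nome_arquivo_tomadores(numero_pagina, texto):
--
--   linhas = texto.split('\n')
--
--   vencimento = ''
--   cnpj_primeiro = ''
--   cnpj_ultimo = ''
--   cnpj = ''
--
--   cont_linha = 0
--   for linha in linhas:
--     elementos = linha.split(' ')
--
--     if cont_linha==1:
--       vencimento = elementos[0]
--     elif len(elementos)>6:
--       auxiliar = elementos[6]
--       auxiliar = auxiliar.upper()
--
--       if auxiliar.find('TRABALHADORES')>=0: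
--         cnpj = auxiliar[-7:].strip()
--
--         cnpj = cnpj.replace('-','')
--
--         if cnpj.isdigit():
--           if cnpj_primeiro == '':
--             cnpj_primeiro = cnpj
--             cnpj_ultimo = cnpj
--           else:
--             cnpj_ultimo = cnpj
--
--     cont_linha+=1
--
--   nome_arquivo = 'Relação de Tomadores de Serviço '+vencimento.replace('/','-')+' '+cnpj_primeiro+' a '+cnpj_ultimo+ '.pdf'
--   return nome_arquivo
-- ===== SOURCE B (Python) =====
-- def _cnpj(linha):
--     """Return the CNPJ suffix encoded in a 'TRABALHADORES' line, or None."""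
--     elementos = linha.split(' ')
--     if len(elementos) > 6:
--         auxiliar = elementos[6].upper()
--         if 'TRABALHADORES' in auxiliar:
--             cnpj = auxiliar[-7:].strip().replace('-', '')
--             if cnpj.isdigit():
--                 return cnpj
--     return None
--
--
-- def get_nome_arquivo_tomadores(numero_pagina, texto):
--     linhas = texto.split('\n')
--     vencimento = linhas[1].split(' ')[0] if len(linhas) > 1 else ''
--     candidatas = [linha for i, linha in enumerate(linhas) if i != 1]
--     cnpj_primeiro = next((c for c in map(_cnpj, candidatas) if c is not None), '')
--     cnpj_ultimo = next((c for c in map(_cnpj, reversed(candidatas)) if c is not None), '')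
--     return ('Relação de Tomadores de Serviço ' + vencimento.replace('/', '-')
--             + ' ' + cnpj_primeiro + ' a ' + cnpj_ultimo + '.pdf')
-- ===== Notes on version B (the rewrite author's own statement) =====
-- stated objective: alternative
-- what changed: A's single stateful pass with a line counter and first/last CNPJ flag accumulators is replaced by direct extraction of the vencimento from line 1 plus two independent first-match scans over the non-vencimento lines (forward for the first CNPJ, reversed for the last).
import Mathlib
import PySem

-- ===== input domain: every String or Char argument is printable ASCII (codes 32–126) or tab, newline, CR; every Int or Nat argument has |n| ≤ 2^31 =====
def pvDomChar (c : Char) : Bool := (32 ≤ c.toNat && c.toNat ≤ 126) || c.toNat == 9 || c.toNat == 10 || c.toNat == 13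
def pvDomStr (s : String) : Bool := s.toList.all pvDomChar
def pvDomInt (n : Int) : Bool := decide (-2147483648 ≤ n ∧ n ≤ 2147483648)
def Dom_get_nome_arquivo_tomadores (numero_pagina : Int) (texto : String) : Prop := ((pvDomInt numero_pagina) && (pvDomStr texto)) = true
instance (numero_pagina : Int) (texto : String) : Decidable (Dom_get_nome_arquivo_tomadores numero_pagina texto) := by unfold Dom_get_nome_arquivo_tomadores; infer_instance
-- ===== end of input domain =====

-- B replaces A's one stateful counter/flag loop by extracting the vencimento line directly and
-- making two independent first-match scans (forward for the first CNPJ, reversed for the last);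
-- objective: alternative decomposition, same cost.

-- ===== PORT A =====
-- one loop iteration of A; the Python local `cnpj` is never read across iterations, so it is a `let` here
def pvStepA (st : String × String × String × Int) (linha : String) : String × String × String × Int :=
  let elementos := (PySem.Str.split? linha " ").getD []   -- sep ≠ "", split? is always `some`
  match st with
  | (venc, p, u, cont) =>
    if cont == 1 then
      -- elementos[0] : split with nonempty sep is never empty, so this is exact
      (elementos.headD "", p, u, cont + 1)
    else if elementos.length > 6 then
      -- elementos[6] : in range because length > 6, so `.getD ""` is exact
      let auxiliar := PySem.Str.upper ((PySem.List.pyGet? elementos 6).getD "")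
      if 0 ≤ PySem.Str.find auxiliar "TRABALHADORES" then
        let cnpj := PySem.Str.strip (PySem.Str.slice auxiliar (some (-7)) none)
        let cnpj := PySem.Str.replace cnpj "-" ""
        if PySem.Str.strIsdigit cnpj then
          if p == "" then (venc, cnpj, cnpj, cont + 1) else (venc, p, cnpj, cont + 1)
        else (venc, p, u, cont + 1)
      else (venc, p, u, cont + 1)
    else (venc, p, u, cont + 1)

def get_nome_arquivo_tomadores (numero_pagina : Int) (texto : String) : String :=
  let linhas := (PySem.Str.split? texto "\n").getD []
  let st := linhas.foldl pvStepA ("", "", "", 0)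
  "Relação de Tomadores de Serviço " ++ PySem.Str.replace st.1 "/" "-" ++ " " ++
    st.2.1 ++ " a " ++ st.2.2.1 ++ ".pdf"

-- ===== PORT B =====
-- Source B's _cnpj: the CNPJ suffix encoded in a 'TRABALHADORES' line, or none
def pvCnpj? (linha : String) : Option String :=
  let elementos := (PySem.Str.split? linha " ").getD []
  if elementos.length > 6 then
    let auxiliar := PySem.Str.upper ((PySem.List.pyGet? elementos 6).getD "")
    if PySem.Str.isIn "TRABALHADORES" auxiliar then
      let cnpj := PySem.Str.replace (PySem.Str.strip (PySem.Str.slice auxiliar (some (-7)) none)) "-" ""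
      if PySem.Str.strIsdigit cnpj then some cnpj else none
    else none
  else none

def get_nome_arquivo_tomadores_alt (numero_pagina : Int) (texto : String) : String :=
  let linhas := (PySem.Str.split? texto "\n").getD []
  let vencimento :=
    if linhas.length > 1 then
      ((PySem.Str.split? ((PySem.List.pyGet? linhas 1).getD "") " ").getD []).headD ""
    else ""
  let candidatas := (PySem.List.enumerate linhas).filterMap
    (fun p => if p.1 ≠ 1 then some p.2 else none)
  let cnpj_primeiro := (candidatas.findSome? pvCnpj?).getD ""
  let cnpj_ultimo := (candidatas.reverse.findSome? pvCnpj?).getD ""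
  "Relação de Tomadores de Serviço " ++ PySem.Str.replace vencimento "/" "-" ++ " " ++
    cnpj_primeiro ++ " a " ++ cnpj_ultimo ++ ".pdf"

-- ===== PRECONDITION & SPEC =====
def Spec_get_nome_arquivo_tomadores (numero_pagina : Int) (texto : String) (out : String) : Prop := out = get_nome_arquivo_tomadores_alt numero_pagina texto
instance (numero_pagina : Int) (texto : String) (out : String) : Decidable (Spec_get_nome_arquivo_tomadores numero_pagina texto out) := by unfold Spec_get_nome_arquivo_tomadores; infer_instance

-- ===== CLAIM (what is proved, stated in full; the proofs are below) =====
def Claim_equal_get_nome_arquivo_tomadores : Prop := ∀ (numero_pagina : Int) (texto : String), Dom_get_nome_arquivo_tomadores numero_pagina texto → Spec_get_nome_arquivo_tomadores numero_pagina texto (get_nome_arquivo_tomadores numero_pagina texto)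

-- ===== LEMMAS AND PROOFS =====

theorem pvCnpj?_ne_empty (linha : String) (c : String) (h : pvCnpj? linha = some c) : c ≠ "" := by
  intro hc
  subst hc
  simp only [pvCnpj?] at h
  split_ifs at h with h1 h2 h3
  · rw [Option.some.injEq] at h
    rw [h] at h3
    exact absurd h3 (by decide)

-- A's `find ≥ 0` test is B's `in` test
theorem pv_find_nonneg_eq_isIn (s sub : String) :
    (0 ≤ PySem.Str.find s sub) ↔ PySem.Str.isIn sub s = true := by
  rw [PySem.Str.find_nonneg_iff, PySem.Str.isIn_iff_infix]

-- one step of A, with the counter away from 1, expressed through B's matcher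
theorem pvStepA_eq (v p u : String) (n : Int) (hn : n ≠ 1) (linha : String) :
    pvStepA (v, p, u, n) linha =
      match pvCnpj? linha with
      | none => (v, p, u, n + 1)
      | some m => if p = "" then (v, m, m, n + 1) else (v, p, m, n + 1) := by
  simp only [pvStepA, pvCnpj?, beq_iff_eq, hn, if_false]
  by_cases h6 : ((PySem.Str.split? linha " ").getD []).length > 6
  · rw [if_pos h6, if_pos h6]
    by_cases hin : PySem.Str.isIn "TRABALHADORES"
        (PySem.Str.upper ((PySem.List.pyGet? ((PySem.Str.split? linha " ").getD []) 6).getD "")) = true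
    · rw [if_pos ((pv_find_nonneg_eq_isIn _ _).mpr hin), if_pos hin]
      by_cases hd : PySem.Str.strIsdigit (PySem.Str.replace (PySem.Str.strip
          (PySem.Str.slice (PySem.Str.upper ((PySem.List.pyGet?
            ((PySem.Str.split? linha " ").getD []) 6).getD "")) (some (-7)) none)) "-" "") = true
      · rw [if_pos hd, if_pos hd]
      · rw [if_neg hd, if_neg hd]
    · rw [if_neg (fun hf => hin ((pv_find_nonneg_eq_isIn _ _).mp hf)), if_neg hin]
  · rw [if_neg h6, if_neg h6]

theorem pv_len (n : Int) (k : Nat) : n + 1 + (k : Int) = n + ((k + 1 : Nat) : Int) := by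
  push_cast; ring

theorem pvStepA_none (v p u : String) (n : Int) (hn : n ≠ 1) (linha : String)
    (hfa : pvCnpj? linha = none) : pvStepA (v, p, u, n) linha = (v, p, u, n + 1) := by
  rw [pvStepA_eq v p u n hn linha, hfa]

theorem pvStepA_some (v p u : String) (n : Int) (hn : n ≠ 1) (linha : String) (m : String)
    (hfa : pvCnpj? linha = some m) :
    pvStepA (v, p, u, n) linha = if p = "" then (v, m, m, n + 1) else (v, p, m, n + 1) := by
  rw [pvStepA_eq v p u n hn linha, hfa]

-- the tail of A's fold (counter ≥ 2): first/last accumulators through B's matcher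
theorem pvFoldA_inv (ls : List String) (v p u : String) (n : Int) (hn : 2 ≤ n) :
    ls.foldl pvStepA (v, p, u, n) =
      (v,
       (if p = "" then (ls.filterMap pvCnpj?).headD "" else p),
       (ls.filterMap pvCnpj?).getLastD u,
       n + ls.length) := by
  induction ls generalizing p u n with
  | nil => simp
  | cons a t ih =>
    cases hfa : pvCnpj? a with
    | none =>
      rw [List.foldl_cons, pvStepA_none v p u n (by omega) a hfa,
        ih p u (n + 1) (by omega)]
      simp only [List.filterMap_cons, hfa, List.length_cons]
      rw [pv_len n t.length]
    | some m =>
      have hm : m ≠ "" := pvCnpj?_ne_empty a m hfa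
      rw [List.foldl_cons, pvStepA_some v p u n (by omega) a m hfa]
      by_cases hp : p = ""
      · rw [if_pos hp, ih m m (n + 1) (by omega), if_pos hp]
        simp only [List.filterMap_cons, hfa, hm, if_false, List.headD_cons,
          List.getLastD_cons, List.length_cons]
        rw [pv_len n t.length]
      · rw [if_neg hp, ih p m (n + 1) (by omega), if_neg hp]
        simp only [List.filterMap_cons, hfa, List.getLastD_cons, List.length_cons]
        rw [pv_len n t.length, if_neg hp]

-- first match of a scan is the head of the filterMap
theorem pv_findSome?_eq (f : String → Option String) (l : List String) :
    l.findSome? f = (l.filterMap f).head? := by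
  induction l with
  | nil => rfl
  | cons a t ih =>
    rw [List.findSome?_cons, List.filterMap_cons]
    cases h : f a
    · exact ih
    · rfl

-- first match of the reversed scan is the last of the filterMap
theorem pv_findSome?_reverse_eq (f : String → Option String) (l : List String) :
    l.reverse.findSome? f = (l.filterMap f).getLast? := by
  rw [pv_findSome?_eq, List.filterMap_reverse, List.head?_reverse]

-- dropping index 1 from an enumeration whose start is ≥ 2 keeps everything (simp-normal form)
theorem pv_enum_filter_ge2 (t : List String) (s : Int) (hs : 2 ≤ s) :
    (PySem.List.enumerate t s).filterMap (fun x => if x.1 = 1 then none else some x.2) = t := by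
  induction t generalizing s with
  | nil => simp [PySem.List.enumerate_nil]
  | cons a t ih =>
    simp only [PySem.List.enumerate_cons, List.filterMap_cons,
      if_neg (show ¬(s = (1 : Int)) by omega)]
    rw [ih (s + 1) (by omega)]

theorem pv_getLastD_eq (l : List String) (d : String) : l.getLastD d = (l.getLast?).getD d := by
  cases l <;> simp

-- A's iteration with the counter at 1: only vencimento is set
theorem pvStepA_one (v p u : String) (linha : String) :
    pvStepA (v, p, u, 1) linha = (((PySem.Str.split? linha " ").getD []).headD "", p, u, 2) := by
  rfl

-- the whole equivalence, stated over the already-split list of lines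
theorem pv_main (linhas : List String) :
    (((linhas.foldl pvStepA ("", "", "", 0)).1 : String),
      (linhas.foldl pvStepA ("", "", "", 0)).2.1,
      (linhas.foldl pvStepA ("", "", "", 0)).2.2.1) =
      ((if linhas.length > 1 then
          ((PySem.Str.split? ((PySem.List.pyGet? linhas 1).getD "") " ").getD []).headD ""
        else ""),
       (((PySem.List.enumerate linhas).filterMap
          (fun p => if p.1 ≠ 1 then some p.2 else none)).findSome? pvCnpj?).getD "",
       (((PySem.List.enumerate linhas).filterMap
          (fun p => if p.1 ≠ 1 then some p.2 else none)).reverse.findSome? pvCnpj?).getD "") := by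
  match linhas with
  | [] => decide
  | [l0] =>
    have hlen : ¬([l0].length > 1) := by simp
    have hcand : (PySem.List.enumerate [l0]).filterMap
        (fun p => if p.1 ≠ 1 then some p.2 else none) = [l0] := by
      rw [PySem.List.enumerate_cons, PySem.List.enumerate_nil, List.filterMap_cons,
        List.filterMap_nil]
      norm_num
    rw [if_neg hlen, hcand, pv_findSome?_eq, pv_findSome?_reverse_eq]
    cases h : pvCnpj? l0 with
    | none =>
      rw [List.foldl_cons, List.foldl_nil, pvStepA_none "" "" "" 0 (by decide) l0 h]
      simp [h]
    | some m =>
      rw [List.foldl_cons, List.foldl_nil, pvStepA_some "" "" "" 0 (by decide) l0 m h,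
        if_pos rfl]
      simp [h]
  | l0 :: l1 :: t =>
    have hcand : (PySem.List.enumerate (l0 :: l1 :: t)).filterMap
        (fun p => if p.1 ≠ 1 then some p.2 else none) = l0 :: t := by
      simp [PySem.List.enumerate_cons]
      exact pv_enum_filter_ge2 t 2 (by omega)
    have hget : (PySem.List.pyGet? (l0 :: l1 :: t) 1).getD "" = l1 := by
      simp [PySem.List.pyGet?, PySem.List.pyIdx?]
    have hlen : ((l0 :: l1 :: t).length > 1) := by simp
    rw [hcand, if_pos hlen, hget, pv_findSome?_eq, pv_findSome?_reverse_eq]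
    cases h0 : pvCnpj? l0 with
    | none =>
      rw [List.foldl_cons, pvStepA_none "" "" "" 0 (by decide) l0 h0,
        show ((0 : Int) + 1) = 1 by decide, List.foldl_cons, pvStepA_one,
        pvFoldA_inv t _ "" "" 2 (by omega)]
      simp [h0]
    | some m =>
      have hm : m ≠ "" := pvCnpj?_ne_empty l0 m h0
      rw [List.foldl_cons, pvStepA_some "" "" "" 0 (by decide) l0 m h0, if_pos rfl,
        show ((0 : Int) + 1) = 1 by decide, List.foldl_cons, pvStepA_one,
        pvFoldA_inv t _ m m 2 (by omega)]
      simp only [List.filterMap_cons, h0, hm, if_false, List.head?_cons, Option.getD_some,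
        List.getLast?_cons, pv_getLastD_eq]

-- ===== VERDICT (by name: the statement is the Claim_ definition above) =====
theorem get_nome_arquivo_tomadores_spec : Claim_equal_get_nome_arquivo_tomadores := by
  intro np texto _
  unfold Spec_get_nome_arquivo_tomadores
  simp only [get_nome_arquivo_tomadores, get_nome_arquivo_tomadores_alt]
  have h := pv_main ((PySem.Str.split? texto "\n").getD [])
  injection h with h1 h'
  injection h' with h2 h3
  rw [h1, h2, h3]
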